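-- pv_equiv track=rewrite | github.com/minu-j/TIL | Today Minu Learned/Python/220726/workshop/0726_workshop_01_duplicate.py | duplicated_letters
-- ===== SOURCE A (Python) =====
-- def duplicated_letters(letter):
--     letter_list = sorted(list(letter)) # 문자열을 리스트로 변환
--     answer = set() # 답을 모을 셋을 생성
--
--     for i in range(len(letter_list)-1): # 리스트 마지막을 제외한 글자들 중
--         if letter_list[i] == letter_list[i + 1]: # 해당하는 글자와 그 다음글자가 같다면?
--             answer.add(letter_list[i]) # 셋에 해당 글자를 추가
--     answer = sorted(list(answer)) # 만들어진 셋을 리스트로 변환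
--     return answer # 정답 리스트 반환
-- ===== SOURCE B (Python) =====
-- def duplicated_letters(letter):
--     seen = set()
--     dup = set()
--     for ch in letter:
--         if ch in seen:
--             dup.add(ch)
--         else:
--             seen.add(ch)
--     return sorted(dup)
-- ===== Notes on version B (the rewrite author's own statement) =====
-- stated objective: faster
-- what changed: Replaced sort-then-compare-adjacent (sort the whole input, scan indices for equal neighbours) by a single unsorted pass maintaining seen/dup sets, sorting only the (usually tiny) duplicate set at the end.
import Mathlib
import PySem

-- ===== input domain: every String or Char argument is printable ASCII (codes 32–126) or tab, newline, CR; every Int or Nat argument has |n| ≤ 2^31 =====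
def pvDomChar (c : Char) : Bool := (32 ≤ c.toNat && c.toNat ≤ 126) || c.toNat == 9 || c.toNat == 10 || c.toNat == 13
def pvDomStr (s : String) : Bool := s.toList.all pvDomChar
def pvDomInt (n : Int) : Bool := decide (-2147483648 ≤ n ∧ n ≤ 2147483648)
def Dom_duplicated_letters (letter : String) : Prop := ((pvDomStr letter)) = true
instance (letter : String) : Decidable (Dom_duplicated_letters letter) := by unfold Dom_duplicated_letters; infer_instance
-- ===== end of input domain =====

-- B replaces A's sort-then-compare-adjacent scan by a single unsorted pass with seen/dup sets, sorting only the duplicates (idiomatic).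

-- ===== PORT A =====
-- every index i in range(0, len-1) is in range, so pyGetD with default "" is exact here
def duplicated_letters (letter : String) : List String :=
  let letter_list := PySem.List.sorted (letter.toList.map (fun c => String.ofList [c])) (fun x => x) false
  let answer : PySem.Set String :=
    (PySem.List.pyRange 0 ((letter_list.length : Int) - 1) 1).foldl
      (fun acc i =>
        if PySem.List.pyGetD letter_list i "" == PySem.List.pyGetD letter_list (i+1) "" then
          PySem.Set.add acc (PySem.List.pyGetD letter_list i "")
        else acc)
      PySem.Set.empty
  PySem.List.sorted answer (fun x => x) false

-- ===== PORT B =====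
def duplicated_letters_alt (letter : String) : List String :=
  let p := (letter.toList.map (fun c => String.ofList [c])).foldl
    (fun (sd : PySem.Set String × PySem.Set String) ch =>
      if PySem.Set.contains sd.1 ch then (sd.1, PySem.Set.add sd.2 ch)
      else (PySem.Set.add sd.1 ch, sd.2))
    (PySem.Set.empty, PySem.Set.empty)
  PySem.List.sorted p.2 (fun x => x) false

-- ===== PRECONDITION & SPEC =====
def Spec_duplicated_letters (letter : String) (out : List String) : Prop := out = duplicated_letters_alt letter
instance (letter : String) (out : List String) : Decidable (Spec_duplicated_letters letter out) := by unfold Spec_duplicated_letters; infer_instance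

-- ===== CLAIM (what is proved, stated in full; the proofs are below) =====
def Claim_equal_duplicated_letters : Prop := ∀ (letter : String), Dom_duplicated_letters letter → Spec_duplicated_letters letter (duplicated_letters letter)

-- ===== LEMMAS AND PROOFS =====

-- membership in A's loop accumulator
theorem memA (x : String) (L : List String) (r : List Int) :
    ∀ s : PySem.Set String, (x ∈ r.foldl
      (fun acc i =>
        if PySem.List.pyGetD L i "" == PySem.List.pyGetD L (i+1) "" then
          PySem.Set.add acc (PySem.List.pyGetD L i "")
        else acc) s ↔
      x ∈ s ∨ ∃ i ∈ r, PySem.List.pyGetD L i "" = PySem.List.pyGetD L (i+1) "" ∧ PySem.List.pyGetD L i "" = x) := by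
  induction r with
  | nil => simp
  | cons a t ih =>
    intro s
    simp only [List.foldl_cons]
    by_cases h : PySem.List.pyGetD L a "" = PySem.List.pyGetD L (a+1) ""
    · rw [if_pos (by simpa using h), ih]
      simp only [PySem.Set.mem_add, List.mem_cons]
      constructor
      · rintro (⟨hs | he⟩ | ⟨i, hi, h1, h2⟩)
        · exact Or.inl hs
        · exact Or.inr ⟨a, Or.inl rfl, h, he.symm⟩
        · exact Or.inr ⟨i, Or.inr hi, h1, h2⟩
      · rintro (hs | ⟨i, hi | hi, h1, h2⟩)
        · exact Or.inl (Or.inl hs)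
        · subst hi; exact Or.inl (Or.inr h2.symm)
        · exact Or.inr ⟨i, hi, h1, h2⟩
    · rw [if_neg (by simpa using h), ih]
      simp only [List.mem_cons]
      constructor
      · rintro (hs | ⟨i, hi, h1, h2⟩)
        · exact Or.inl hs
        · exact Or.inr ⟨i, Or.inr hi, h1, h2⟩
      · rintro (hs | ⟨i, hi | hi, h1, h2⟩)
        · exact Or.inl hs
        · subst hi; exact absurd h1 h
        · exact Or.inr ⟨i, hi, h1, h2⟩

theorem nodupA (L : List String) (r : List Int) :
    ∀ s : PySem.Set String, s.Nodup → (r.foldl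
      (fun acc i =>
        if PySem.List.pyGetD L i "" == PySem.List.pyGetD L (i+1) "" then
          PySem.Set.add acc (PySem.List.pyGetD L i "")
        else acc) s).Nodup := by
  induction r with
  | nil => intro s hs; simpa using hs
  | cons a t ih =>
    intro s hs
    simp only [List.foldl_cons]
    split
    · exact ih _ (PySem.Set.nodup_add _ _ hs)
    · exact ih _ hs

-- adjacent equal pair → count ≥ 2 (any list)
theorem count_ge_two_of_adj (x : String) :
    ∀ (S : List String) (k : Nat) (hk : k + 1 < S.length),
      S[k] = x → S[k+1]'hk = x → 2 ≤ S.count x := by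
  intro S
  induction S with
  | nil => intro k hk; simp at hk
  | cons a t ih =>
    intro k hk h1 h2
    cases k with
    | zero =>
      simp only [List.getElem_cons_zero] at h1
      simp only [List.getElem_cons_succ] at h2
      have ht : x ∈ t := h2 ▸ List.getElem_mem _
      have hc : 1 ≤ t.count x := List.count_pos_iff.mpr ht
      simp only [List.count_cons, h1, beq_self_eq_true, if_pos]
      omega
    | succ m =>
      have h := ih m (by simpa using hk) (by simpa using h1) (by simpa using h2)
      calc 2 ≤ t.count x := h
        _ ≤ (a :: t).count x := List.count_le_count_cons

-- in a ≤-sorted list, count ≥ 2 → some adjacent equal pair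
theorem adj_of_count (x : String) :
    ∀ (S : List String), S.Pairwise (· ≤ ·) → 2 ≤ S.count x →
      ∃ k : Nat, ∃ hk : k + 1 < S.length, S[k] = x ∧ S[k+1]'hk = x := by
  intro S
  induction S with
  | nil => simp
  | cons a t ih =>
    intro hp hc
    rcases List.pairwise_cons.mp hp with ⟨hle, hpt⟩
    by_cases hax : a = x
    · have htc : 1 ≤ t.count x := by
        simp only [List.count_cons, hax, beq_self_eq_true, if_pos] at hc
        omega
      have hxt : x ∈ t := List.count_pos_iff.mp htc
      cases t with
      | nil => simp at hxt
      | cons b u =>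
        have hab : a ≤ b := hle b (by simp)
        have hbx : b ≤ x := by
          rcases List.mem_cons.mp hxt with h | h
          · exact h.ge
          · exact (List.pairwise_cons.mp hpt).1 x h
        have hb : b = x := le_antisymm hbx (hax ▸ hab)
        exact ⟨0, by simp, by simpa using hax, by simpa using hb⟩
    · have htc : 2 ≤ t.count x := by
        have : ((a == x) = false) := beq_eq_false_iff_ne.mpr hax
        simpa [List.count_cons, this] using hc
      rcases ih hpt htc with ⟨k, hk, h1, h2⟩
      exact ⟨k + 1, by simpa using hk, by simpa using h1, by simpa using h2⟩

-- joint characterisation of B's seen/dup accumulators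
theorem memB (x : String) :
    ∀ (LS : List String) (seen dup : PySem.Set String), seen.Nodup → dup.Nodup →
      ((LS.foldl
        (fun (sd : PySem.Set String × PySem.Set String) ch =>
          if PySem.Set.contains sd.1 ch then (sd.1, PySem.Set.add sd.2 ch)
          else (PySem.Set.add sd.1 ch, sd.2)) (seen, dup)).2.Nodup ∧
       (x ∈ (LS.foldl
        (fun (sd : PySem.Set String × PySem.Set String) ch =>
          if PySem.Set.contains sd.1 ch then (sd.1, PySem.Set.add sd.2 ch)
          else (PySem.Set.add sd.1 ch, sd.2)) (seen, dup)).2 ↔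
        x ∈ dup ∨ (x ∈ seen ∧ x ∈ LS) ∨ 2 ≤ LS.count x)) := by
  intro LS
  induction LS with
  | nil => intro seen dup h1 h2; simpa using h2
  | cons a t ih =>
    intro seen dup h1 h2
    simp only [List.foldl_cons]
    by_cases hmem : a ∈ seen
    · rw [if_pos ((PySem.Set.contains_iff _ _).mpr hmem)]
      obtain ⟨n2, m2⟩ := ih seen (PySem.Set.add dup a) h1 (PySem.Set.nodup_add _ _ h2)
      refine ⟨n2, ?_⟩
      rw [m2, PySem.Set.mem_add]
      constructor
      · rintro ((h | h) | ⟨hs, ht⟩ | h)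
        · exact Or.inl h
        · exact Or.inr (Or.inl ⟨h ▸ hmem, h ▸ List.mem_cons_self⟩)
        · exact Or.inr (Or.inl ⟨hs, List.mem_cons_of_mem a ht⟩)
        · exact Or.inr (Or.inr (le_trans h List.count_le_count_cons))
      · rintro (h | ⟨hs, ht⟩ | h)
        · exact Or.inl (Or.inl h)
        · rcases List.mem_cons.mp ht with hxa | ht'
          · exact Or.inl (Or.inr hxa)
          · exact Or.inr (Or.inl ⟨hs, ht'⟩)
        · by_cases hax : x = a
          · exact Or.inl (Or.inr hax)
          · have hcnt : (a :: t).count x = t.count x := by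
              have hb : ((a == x) = false) := beq_eq_false_iff_ne.mpr (fun h2 => hax h2.symm)
              simp [List.count_cons, hb]
            exact Or.inr (Or.inr (hcnt ▸ h))
    · rw [if_neg (by simp [hmem])]
      obtain ⟨n2, m2⟩ := ih (PySem.Set.add seen a) dup (PySem.Set.nodup_add _ _ h1) h2
      refine ⟨n2, ?_⟩
      rw [m2, PySem.Set.mem_add]
      constructor
      · rintro (h | ⟨hs | hxa, ht⟩ | h)
        · exact Or.inl h
        · exact Or.inr (Or.inl ⟨hs, List.mem_cons_of_mem a ht⟩)
        · refine Or.inr (Or.inr ?_)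
          have hcnt : (a :: t).count x = t.count x + 1 := by
            simp [hxa]
          have h1c : 1 ≤ t.count x := List.count_pos_iff.mpr ht
          omega
        · exact Or.inr (Or.inr (le_trans h List.count_le_count_cons))
      · rintro (h | ⟨hs, ht⟩ | h)
        · exact Or.inl h
        · rcases List.mem_cons.mp ht with hxa | ht'
          · exact absurd (hxa ▸ hs) hmem
          · exact Or.inr (Or.inl ⟨Or.inl hs, ht'⟩)
        · by_cases hax : x = a
          · have hcnt : (a :: t).count x = t.count x + 1 := by
              simp [hax]
            have h1c : 1 ≤ t.count x := by omega
            exact Or.inr (Or.inl ⟨Or.inr hax, List.count_pos_iff.mp h1c⟩)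
          · have hcnt : (a :: t).count x = t.count x := by
              have hb : ((a == x) = false) := beq_eq_false_iff_ne.mpr (fun h2 => hax h2.symm)
              simp [List.count_cons, hb]
            exact Or.inr (Or.inr (hcnt ▸ h))

-- x is in A's answer set iff x occurs at least twice (stated for the sorted list S := sorted L)
theorem memA_iff_count (x : String) (L : List String) :
    (x ∈ (PySem.List.pyRange 0 (((PySem.List.sorted L (fun x => x) false).length : Int) - 1) 1).foldl
      (fun acc i =>
        if PySem.List.pyGetD (PySem.List.sorted L (fun x => x) false) i "" ==
           PySem.List.pyGetD (PySem.List.sorted L (fun x => x) false) (i+1) "" then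
          PySem.Set.add acc (PySem.List.pyGetD (PySem.List.sorted L (fun x => x) false) i "")
        else acc) PySem.Set.empty ↔ 2 ≤ L.count x) := by
  set S := PySem.List.sorted L (fun x => x) false with hS
  have hcnt : S.count x = L.count x := (PySem.List.sorted_perm L (fun x => x) false).count_eq x
  rw [memA]
  simp only [PySem.Set.empty, List.not_mem_nil, false_or, PySem.List.mem_pyRange_one]
  rw [← hcnt]
  constructor
  · rintro ⟨i, ⟨h0, hlt⟩, heq, hx⟩
    obtain ⟨k, rfl⟩ : ∃ k : Nat, i = (k : Int) := ⟨i.toNat, (Int.toNat_of_nonneg h0).symm⟩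
    have hk : k + 1 < S.length := by omega
    have e1 : PySem.List.pyGetD S (k : Int) "" = S[k] := by
      rw [PySem.List.pyGetD_natCast, List.getD_eq_getElem]
    have e2 : PySem.List.pyGetD S ((k : Int) + 1) "" = S[k+1] := by
      have : ((k : Int) + 1) = ((k + 1 : Nat) : Int) := by push_cast; ring
      rw [this, PySem.List.pyGetD_natCast, List.getD_eq_getElem]
    exact count_ge_two_of_adj x S k hk (e1 ▸ hx) (e2 ▸ heq ▸ e1 ▸ hx)
  · intro h
    obtain ⟨k, hk, h1, h2⟩ := adj_of_count x S (PySem.List.sorted_pairwise L (fun x => x)) h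
    refine ⟨(k : Int), ⟨by positivity, by omega⟩, ?_, ?_⟩
    · have e1 : PySem.List.pyGetD S (k : Int) "" = S[k] := by
        rw [PySem.List.pyGetD_natCast, List.getD_eq_getElem]
      have e2 : PySem.List.pyGetD S ((k : Int) + 1) "" = S[k+1] := by
        have : ((k : Int) + 1) = ((k + 1 : Nat) : Int) := by push_cast; ring
        rw [this, PySem.List.pyGetD_natCast, List.getD_eq_getElem]
      rw [e1, e2, h1, h2]
    · rw [PySem.List.pyGetD_natCast, List.getD_eq_getElem]; exact h1

-- ===== VERDICT (by name: the statement is the Claim_ definition above) =====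
theorem duplicated_letters_spec : Claim_equal_duplicated_letters := by
  intro letter _
  show duplicated_letters letter = duplicated_letters_alt letter
  unfold duplicated_letters duplicated_letters_alt
  refine PySem.List.sorted_eq_sorted_of_perm _ _ _ (fun a b h => h) ?_
  set L := letter.toList.map (fun c => String.ofList [c]) with hL
  refine (List.perm_ext_iff_of_nodup ?_ ?_).mpr ?_
  · exact nodupA _ _ PySem.Set.empty List.nodup_nil
  · exact (memB "" L PySem.Set.empty PySem.Set.empty List.nodup_nil List.nodup_nil).1
  · intro x
    rw [memA_iff_count x L,
      (memB x L PySem.Set.empty PySem.Set.empty List.nodup_nil List.nodup_nil).2]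
    simp [PySem.Set.empty]
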